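-- pv_equiv track=rewrite | github.com/kuk329/codingTestPractice | programmers/level0/배열 조각하기.py | solution
-- ===== SOURCE A (Python) =====
-- def solution(arr, query):
--     for i in range(len(query)):
--         idx=query[i]
--         if i%2==0: #짝수
--             arr=arr[0:idx+1]
--
--         else:
--             arr=arr[idx:]
--
--
--     return arr
-- ===== SOURCE B (Python) =====
-- def solution(arr, query):
--     # Track the window [lo, hi) over the original array instead of reslicing.
--     lo, hi = 0, len(arr)
--     for i, idx in enumerate(query):
--         L = hi - lo
--         if i % 2 == 0:
--             b = idx + 1
--             e = max(0, L + b) if b < 0 else min(L, b)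
--             hi = lo + e
--         else:
--             s = max(0, L + idx) if idx < 0 else min(L, idx)
--             lo = lo + s
--     return arr[lo:hi]
-- ===== Notes on version B (the rewrite author's own statement) =====
-- stated objective: alternative
-- what changed: Instead of materialising a new list slice for every query, B keeps integer window bounds lo/hi over the original array, updates them per query with Python's slice-clamping arithmetic, and slices once at the end.
import Mathlib
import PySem

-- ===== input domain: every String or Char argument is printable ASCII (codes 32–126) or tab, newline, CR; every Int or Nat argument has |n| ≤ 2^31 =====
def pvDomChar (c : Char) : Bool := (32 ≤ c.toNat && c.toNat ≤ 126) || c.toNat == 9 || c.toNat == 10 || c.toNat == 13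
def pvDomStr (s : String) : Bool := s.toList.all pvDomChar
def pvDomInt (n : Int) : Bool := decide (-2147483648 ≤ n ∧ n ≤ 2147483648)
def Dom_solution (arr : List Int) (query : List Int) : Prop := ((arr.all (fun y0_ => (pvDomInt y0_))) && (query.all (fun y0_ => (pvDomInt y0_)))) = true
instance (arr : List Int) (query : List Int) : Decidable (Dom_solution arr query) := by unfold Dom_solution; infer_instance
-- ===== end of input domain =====

-- B changes the algorithm: A materialises a new list slice on every query; B only tracks
-- integer window bounds lo/hi per query and slices the original array once at the end.

-- ===== PORT A =====
-- loop body of A: on even i take arr[0:idx+1], on odd i take arr[idx:]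
def stepA (arr : List Int) (p : Int × Int) : List Int :=
  if p.1 % 2 = 0 then PySem.List.slice arr (some 0) (some (p.2 + 1))
  else PySem.List.slice arr (some p.2) none

def solution (arr : List Int) (query : List Int) : List Int :=
  (PySem.List.enumerate query 0).foldl stepA arr

-- ===== PORT B =====
-- loop body of B: update (lo, hi) with Python's slice-clamping arithmetic
def stepB (st : Int × Int) (p : Int × Int) : Int × Int :=
  let L := st.2 - st.1
  if p.1 % 2 = 0 then
    let b := p.2 + 1
    let e := if b < 0 then max 0 (L + b) else min L b
    (st.1, st.1 + e)
  else
    let s := if p.2 < 0 then max 0 (L + p.2) else min L p.2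
    (st.1 + s, st.2)

def solution_alt (arr : List Int) (query : List Int) : List Int :=
  let st := (PySem.List.enumerate query 0).foldl stepB (0, (arr.length : Int))
  PySem.List.slice arr (some st.1) (some st.2)

-- ===== PRECONDITION & SPEC =====
def Spec_solution (arr : List Int) (query : List Int) (out : List Int) : Prop := out = solution_alt arr query
instance (arr : List Int) (query : List Int) (out : List Int) : Decidable (Spec_solution arr query out) := by unfold Spec_solution; infer_instance

-- ===== CLAIM (what is proved, stated in full; the proofs are below) =====
def Claim_equal_solution : Prop := ∀ (arr : List Int) (query : List Int), Dom_solution arr query → Spec_solution arr query (solution arr query)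

-- ===== LEMMAS AND PROOFS =====

-- clampIdx, written out by sign
lemma clamp_eq (n : Nat) (i : Int) :
    PySem.List.clampIdx n i = if i < 0 then n - (-i).toNat else min i.toNat n := by
  by_cases h : i < 0
  · have hk : 0 < (-i).toNat := by omega
    have hi : i = -(((-i).toNat : Nat) : Int) := by omega
    conv_lhs => rw [hi, PySem.List.clampIdx_neg_natCast _ _ hk]
    rw [if_pos h]
  · have hi : i = ((i.toNat : Nat) : Int) := by omega
    conv_lhs => rw [hi, PySem.List.clampIdx_natCast]
    rw [if_neg h]

-- xs[:b] for any integer b, as a clamped take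
lemma slice_to_clamp (xs : List Int) (b : Int) :
    PySem.List.slice xs none (some b) = xs.take (PySem.List.clampIdx xs.length b) := by
  by_cases h : b < 0
  · have hk : 0 < (-b).toNat := by omega
    have hb : b = -(((-b).toNat : Nat) : Int) := by omega
    conv_lhs => rw [hb, PySem.List.slice_to_neg_natCast _ _ hk]
    rw [clamp_eq, if_pos h]
  · rw [PySem.List.slice_to xs (by omega : (0:Int) ≤ b), clamp_eq, if_neg h]
    by_cases hle : b.toNat ≤ xs.length
    · rw [min_eq_left hle]
    · rw [min_eq_right (by omega), List.take_length,
        List.take_of_length_le (by omega)]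

-- the window: the slice of arr determined by bounds (lo, hi)
def win (arr : List Int) (st : Int × Int) : List Int :=
  (arr.drop st.1.toNat).take (st.2 - st.1).toNat

def Ok (arr : List Int) (st : Int × Int) : Prop :=
  0 ≤ st.1 ∧ st.1 ≤ st.2 ∧ st.2 ≤ (arr.length : Int)

lemma win_length (arr : List Int) (st : Int × Int) (h : Ok arr st) :
    (win arr st).length = (st.2 - st.1).toNat := by
  obtain ⟨h1, h2, h3⟩ := h
  simp [win]
  omega

lemma step_ok (arr : List Int) (st : Int × Int) (p : Int × Int) (h : Ok arr st) :
    Ok arr (stepB st p) := by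
  obtain ⟨h1, h2, h3⟩ := h
  unfold stepB Ok
  split_ifs <;> simp <;> omega

lemma step_win (arr : List Int) (st : Int × Int) (p : Int × Int) (h : Ok arr st) :
    stepA (win arr st) p = win arr (stepB st p) := by
  have hlen := win_length arr st h
  obtain ⟨h1, h2, h3⟩ := h
  unfold stepA stepB
  by_cases hp : p.1 % 2 = 0
  · simp only [if_pos hp]
    rw [PySem.List.slice_zero_start, slice_to_clamp, hlen, clamp_eq]
    unfold win
    simp only
    by_cases hb : p.2 + 1 < 0
    · simp only [if_pos hb]
      rw [List.take_take]
      congr 1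
      omega
    · simp only [if_neg hb]
      rw [List.take_take]
      congr 1
      omega
  · simp only [if_neg hp]
    rw [PySem.List.slice_some_none, hlen, clamp_eq]
    unfold win
    simp only
    by_cases hs : p.2 < 0
    · simp only [if_pos hs]
      rw [List.drop_take, List.drop_drop]
      congr 1
      · omega
      · congr 1
        omega
    · simp only [if_neg hs]
      rw [List.drop_take, List.drop_drop]
      congr 1
      · omega
      · congr 1
        omega

lemma fold_win (qs : List (Int × Int)) (arr : List Int) (st : Int × Int) (h : Ok arr st) :
    qs.foldl stepA (win arr st) = win arr (qs.foldl stepB st) := by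
  induction qs generalizing st with
  | nil => rfl
  | cons p qs ih =>
      simp only [List.foldl_cons]
      rw [step_win arr st p h]
      exact ih (stepB st p) (step_ok arr st p h)

lemma fold_ok (qs : List (Int × Int)) (arr : List Int) (st : Int × Int) (h : Ok arr st) :
    Ok arr (qs.foldl stepB st) := by
  induction qs generalizing st with
  | nil => exact h
  | cons p qs ih => exact ih (stepB st p) (step_ok arr st p h)

-- ===== VERDICT (by name: the statement is the Claim_ definition above) =====
theorem solution_spec : Claim_equal_solution := by
  intro arr query _
  unfold Spec_solution solution solution_alt
  have h0 : Ok arr (0, (arr.length : Int)) := by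
    unfold Ok; constructor <;> simp
  have hw : win arr (0, (arr.length : Int)) = arr := by
    unfold win; simp
  conv_lhs => rw [← hw]
  rw [fold_win _ _ _ h0]
  have hok := fold_ok (PySem.List.enumerate query 0) arr (0, (arr.length : Int)) h0
  obtain ⟨h1, h2, h3⟩ := hok
  rw [PySem.List.slice_of_nonneg arr h1 (by omega) (by omega) h3]
  unfold win
  congr 1
  omega
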